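-- pv_equiv track=rewrite | github.com/albinvestin/AOC2018 | day_2/main.py | check_appearance
-- ===== SOURCE A (Python) =====
-- def check_appearance(line, appearance_number):
--     seen_characters = []
--     for character in line:
--         seen_characters.append(character)
--     for character in seen_characters:
--         if sum(1 for char in seen_characters if char == character) == appearance_number:
--             return 1
--     return 0
-- ===== SOURCE B (Python) =====
-- def check_appearance(line, appearance_number):
--     counts = {}
--     for ch in line:
--         counts[ch] = counts.get(ch, 0) + 1
--     return 1 if appearance_number in counts.values() else 0
-- ===== Notes on version B (the rewrite author's own statement) =====
-- stated objective: faster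
-- what changed: Replaces the quadratic loop that rescans the whole character list for each character with a single pass building a frequency dictionary and then checking its values once.
import Mathlib
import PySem

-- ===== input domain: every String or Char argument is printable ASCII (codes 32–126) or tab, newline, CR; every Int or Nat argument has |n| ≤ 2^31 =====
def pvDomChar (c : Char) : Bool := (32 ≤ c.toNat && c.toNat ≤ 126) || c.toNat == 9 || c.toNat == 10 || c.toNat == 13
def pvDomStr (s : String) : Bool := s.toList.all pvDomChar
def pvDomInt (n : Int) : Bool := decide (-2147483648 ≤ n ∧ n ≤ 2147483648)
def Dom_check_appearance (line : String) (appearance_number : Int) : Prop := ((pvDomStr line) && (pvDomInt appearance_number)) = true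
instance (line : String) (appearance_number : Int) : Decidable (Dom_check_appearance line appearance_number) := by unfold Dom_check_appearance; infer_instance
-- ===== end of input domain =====

-- B replaces A's quadratic per-character rescan with a single frequency-dictionary pass (faster).


-- ===== PORT A =====
-- sum(1 for char in seen_characters if char == character), as the obvious accumulating loop
def pvASum (seen : List Char) (character : Char) : Int :=
  seen.foldl (fun acc char => if char = character then acc + 1 else acc) 0

-- the second 'for character in seen_characters' loop with its early 'return 1'
def pvALoop (seen : List Char) (rest : List Char) (appearance_number : Int) : Int :=
  match rest with
  | [] => 0
  | character :: rs =>
      if pvASum seen character = appearance_number then 1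
      else pvALoop seen rs appearance_number

def check_appearance (line : String) (appearance_number : Int) : Int :=
  let seen_characters := line.toList.foldl (fun acc character => acc ++ [character]) []
  pvALoop seen_characters seen_characters appearance_number

-- ===== PORT B =====
def check_appearance_alt (line : String) (appearance_number : Int) : Int :=
  let counts := line.toList.foldl (fun d ch => d.insert ch (d.getD ch 0 + 1)) (PySem.Dict.empty : PySem.Dict Char Int)
  if appearance_number ∈ counts.values then 1 else 0

-- ===== PRECONDITION & SPEC =====
def Spec_check_appearance (line : String) (appearance_number : Int) (out : Int) : Prop := out = check_appearance_alt line appearance_number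
instance (line : String) (appearance_number : Int) (out : Int) : Decidable (Spec_check_appearance line appearance_number out) := by unfold Spec_check_appearance; infer_instance

-- ===== CLAIM (what is proved, stated in full; the proofs are below) =====
def Claim_equal_check_appearance : Prop := ∀ (line : String) (appearance_number : Int), Dom_check_appearance line appearance_number → Spec_check_appearance line appearance_number (check_appearance line appearance_number)

-- ===== LEMMAS AND PROOFS =====

-- A's inner generator sum is the count of the character in the list
theorem pvASum_eq_count (seen : List Char) (c : Char) :
    pvASum seen c = (seen.count c : Int) := by
  have h := PySem.List.foldl_count_if (fun char => char == c) seen (0:Int)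
  simpa [pvASum, List.count_eq_countP] using h

-- A's outer loop returns 1 iff some listed character has count = appearance_number
theorem pvALoop_eq (seen : List Char) (rest : List Char) (n : Int) :
    pvALoop seen rest n = if ∃ c ∈ rest, (seen.count c : Int) = n then 1 else 0 := by
  induction rest with
  | nil => simp [pvALoop]
  | cons c rs ih =>
      by_cases h : (seen.count c : Int) = n
      · simp [pvALoop, pvASum_eq_count, h]
      · simp [pvALoop, pvASum_eq_count, h, ih]

-- B's membership test checks the same proposition
theorem pvB_values (l : List Char) (n : Int) :
    (n ∈ (l.foldl (fun d ch => d.insert ch (d.getD ch 0 + 1)) (PySem.Dict.empty : PySem.Dict Char Int)).values)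
      ↔ ∃ c ∈ l, (l.count c : Int) = n := by
  rw [PySem.Dict.foldl_insert_getD_add_one_eq_counter]
  have hitems := PySem.Dict.items_counter (xs := l)
  have : (PySem.Dict.counter l).values = (PySem.Set.ofList l).map (fun k => (l.count k : Int)) := by
    simp [PySem.Dict.values, hitems]
  rw [this]
  simp only [List.mem_map]
  constructor
  · rintro ⟨c, hc, hn⟩
    exact ⟨c, (PySem.Set.mem_ofList _ _).1 hc, hn⟩
  · rintro ⟨c, hc, hn⟩
    exact ⟨c, (PySem.Set.mem_ofList _ _).2 hc, hn⟩

-- ===== VERDICT (by name: the statement is the Claim_ definition above) =====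
theorem check_appearance_spec : Claim_equal_check_appearance := by
  intro line n _
  unfold Spec_check_appearance check_appearance check_appearance_alt
  have hseen : line.toList.foldl (fun acc c => acc ++ [c]) [] = line.toList :=
    PySem.List.foldl_append_singleton _ _ |>.trans (by simp)
  simp only [hseen, pvALoop_eq, pvB_values]
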